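-- pv_equiv track=rewrite | github.com/cesaranogilbert/ai-agent-ecosystem-enterprise | services/cognitive_document_intelligence_agent.py | _categorize_length_distribution
-- ===== SOURCE A (Python) =====
-- from typing import Dict, List, Any, Optional
--
-- def _categorize_length_distribution(word_counts: List[int]) -> Dict[str, int]:
--     """Categorize document length distribution"""
--     distribution = {'short': 0, 'medium': 0, 'long': 0}
--
--     for count in word_counts:
--         if count < 500:
--             distribution['short'] += 1
--         elif count < 2000:
--             distribution['medium'] += 1
--         else:
--             distribution['long'] += 1
--
--     return distribution
-- ===== SOURCE B (Python) =====
-- from typing import Dict, List, Any, Optional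
--
-- def _categorize_length_distribution(word_counts: List[int]) -> Dict[str, int]:
--     """Categorize document length distribution"""
--     short = sum(1 for c in word_counts if c < 500)
--     long_ = sum(1 for c in word_counts if c >= 2000)
--     return {'short': short, 'medium': len(word_counts) - short - long_, 'long': long_}
-- ===== Notes on version B (the rewrite author's own statement) =====
-- stated objective: alternative
-- what changed: Replaces the single-pass if/elif dict-mutation loop with two independent boolean sums for short and long, deriving medium as len - short - long.
import Mathlib
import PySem

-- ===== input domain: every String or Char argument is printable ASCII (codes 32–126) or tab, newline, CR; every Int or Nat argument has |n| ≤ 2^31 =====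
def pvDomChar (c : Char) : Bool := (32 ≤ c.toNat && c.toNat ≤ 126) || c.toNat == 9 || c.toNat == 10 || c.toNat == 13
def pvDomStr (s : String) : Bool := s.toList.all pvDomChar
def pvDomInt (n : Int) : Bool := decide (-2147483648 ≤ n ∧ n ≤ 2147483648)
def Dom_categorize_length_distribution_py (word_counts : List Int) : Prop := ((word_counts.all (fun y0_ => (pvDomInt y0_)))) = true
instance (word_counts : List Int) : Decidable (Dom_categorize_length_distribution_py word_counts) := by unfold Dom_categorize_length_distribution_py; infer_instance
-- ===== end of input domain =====

-- B replaces A's single-pass if/elif dict-mutation loop by two independent counts (short, long) and derives medium as length - short - long; alternative decomposition, same cost.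


-- ===== PORT A =====
def categorize_length_distribution_py (word_counts : List Int) : List (String × Int) :=
  (word_counts.foldl
    (fun (d : PySem.Dict String Int) count =>
      if count < 500 then d.modify "short" 0 (· + 1)
      else if count < 2000 then d.modify "medium" 0 (· + 1)
      else d.modify "long" 0 (· + 1))
    (PySem.Dict.ofList [("short", 0), ("medium", 0), ("long", 0)])).items

-- ===== PORT B =====
def categorize_length_distribution_py_alt (word_counts : List Int) : List (String × Int) :=
  let short : Int := word_counts.countP (fun c => decide (c < 500))
  let long_ : Int := word_counts.countP (fun c => decide (2000 ≤ c))
  [("short", short), ("medium", (word_counts.length : Int) - short - long_), ("long", long_)]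

-- ===== PRECONDITION & SPEC =====
def Spec_categorize_length_distribution_py (word_counts : List Int) (out : List (String × Int)) : Prop := out = categorize_length_distribution_py_alt word_counts
instance (word_counts : List Int) (out : List (String × Int)) : Decidable (Spec_categorize_length_distribution_py word_counts out) := by unfold Spec_categorize_length_distribution_py; infer_instance

-- ===== CLAIM (what is proved, stated in full; the proofs are below) =====
def Claim_equal_categorize_length_distribution_py : Prop := ∀ (word_counts : List Int), Dom_categorize_length_distribution_py word_counts → Spec_categorize_length_distribution_py word_counts (categorize_length_distribution_py word_counts)

-- ===== LEMMAS AND PROOFS =====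

-- A's fold over the three-key literal dict, with arbitrary start values.
theorem foldl_categorize (l : List Int) (a b c : Int) :
    (l.foldl
      (fun (d : PySem.Dict String Int) count =>
        if count < 500 then d.modify "short" 0 (· + 1)
        else if count < 2000 then d.modify "medium" 0 (· + 1)
        else d.modify "long" 0 (· + 1))
      (PySem.Dict.mk [("short", a), ("medium", b), ("long", c)])) =
    PySem.Dict.mk [("short", a + l.countP (fun x => decide (x < 500))),
                   ("medium", b + l.countP (fun x => decide (¬ x < 500 ∧ x < 2000))),
                   ("long", c + l.countP (fun x => decide (¬ x < 500 ∧ ¬ x < 2000)))] := by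
  induction l generalizing a b c with
  | nil => simp
  | cons h t ih =>
    simp only [List.foldl_cons, List.countP_cons]
    by_cases h1 : h < 500
    · simp only [if_pos h1]
      have : (PySem.Dict.mk [("short", a), ("medium", b), ("long", c)]).modify "short" 0 (· + 1)
          = PySem.Dict.mk [("short", a + 1), ("medium", b), ("long", c)] := by
        simp [PySem.Dict.modify, PySem.Dict.get?, PySem.Dict.insert, PySem.Dict.getD,
              PySem.Dict.contains]
      rw [this, ih]
      simp only [PySem.Dict.mk.injEq, List.cons.injEq, Prod.mk.injEq, and_true, true_and,
        decide_eq_true_eq]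
      refine ⟨?_, ?_, ?_⟩ <;> (split_ifs <;> push_cast <;> omega)
    · by_cases h2 : h < 2000
      · simp only [if_neg h1, if_pos h2]
        have : (PySem.Dict.mk [("short", a), ("medium", b), ("long", c)]).modify "medium" 0 (· + 1)
            = PySem.Dict.mk [("short", a), ("medium", b + 1), ("long", c)] := by
          simp [PySem.Dict.modify, PySem.Dict.get?, PySem.Dict.insert, PySem.Dict.getD,
                PySem.Dict.contains]
        rw [this, ih]
        simp only [PySem.Dict.mk.injEq, List.cons.injEq, Prod.mk.injEq, and_true, true_and,
          decide_eq_true_eq]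
        refine ⟨?_, ?_, ?_⟩ <;> (split_ifs <;> push_cast <;> omega)
      · simp only [if_neg h1, if_neg h2]
        have : (PySem.Dict.mk [("short", a), ("medium", b), ("long", c)]).modify "long" 0 (· + 1)
            = PySem.Dict.mk [("short", a), ("medium", b), ("long", c + 1)] := by
          simp [PySem.Dict.modify, PySem.Dict.get?, PySem.Dict.insert, PySem.Dict.getD,
                PySem.Dict.contains]
        rw [this, ih]
        simp only [PySem.Dict.mk.injEq, List.cons.injEq, Prod.mk.injEq, and_true, true_and,
          decide_eq_true_eq]
        refine ⟨?_, ?_, ?_⟩ <;> (split_ifs <;> push_cast <;> omega)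

-- the three disjoint buckets partition the list
theorem countP_partition (l : List Int) :
    l.countP (fun x => decide (x < 500)) + l.countP (fun x => decide (¬ x < 500 ∧ x < 2000))
      + l.countP (fun x => decide (¬ x < 500 ∧ ¬ x < 2000)) = l.length := by
  induction l with
  | nil => simp
  | cons h t ih =>
    simp only [List.countP_cons, List.length_cons]
    by_cases h1 : h < 500 <;> by_cases h2 : h < 2000 <;>
      simp only [h1, h2, decide_eq_true_eq, not_true, not_false_iff, and_true, and_false,
        if_true, if_false] <;> omega

theorem not_lt_2000 (l : List Int) :
    l.countP (fun x => decide (¬ x < 500 ∧ ¬ x < 2000)) = l.countP (fun x => decide (2000 ≤ x)) := by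
  apply List.countP_congr
  intro x _
  by_cases h1 : x < 500 <;> by_cases h2 : x < 2000 <;> simp [h1, h2] <;> omega

-- ===== VERDICT (by name: the statement is the Claim_ definition above) =====
theorem categorize_length_distribution_py_spec : Claim_equal_categorize_length_distribution_py := by
  intro l _
  unfold Spec_categorize_length_distribution_py categorize_length_distribution_py
    categorize_length_distribution_py_alt
  have h0 : PySem.Dict.ofList ([("short", (0:Int)), ("medium", 0), ("long", 0)]) =
      PySem.Dict.mk [("short", 0), ("medium", 0), ("long", 0)] := by decide
  rw [h0, foldl_categorize]
  have hp := countP_partition l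
  have hl := not_lt_2000 l
  simp only [List.cons.injEq, Prod.mk.injEq, and_true, true_and]
  refine ⟨by omega, ?_, by omega⟩
  push_cast at hp ⊢
  omega
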